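-- pv_equiv track=rewrite | github.com/PsimonL/Cryptography | Lab3/lab3_1.py | generate_stream_b
-- ===== SOURCE A (Python) =====
-- def generate_stream_b(initial_vector):
--     z = list(initial_vector)
--     stream = z[:]
--
--     for _ in range(100):
--         new_bit = (z[0] + z[3]) % 2
--         z.append(new_bit)
--         stream.append(new_bit)
--         z.pop(0)
--
--     return stream
-- ===== SOURCE B (Python) =====
-- def generate_stream_b(initial_vector):
--     stream = list(initial_vector)
--     for t in range(100):
--         stream.append((stream[t] + stream[t + 3]) % 2)
--     return stream
-- ===== Notes on version B (the rewrite author's own statement) =====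
-- stated objective: simpler
-- what changed: Removed the separate sliding-window list with its append/pop(0) pair; B indexes directly into the growing output (stream[t] + stream[t+3]) since the window front is always stream[t].
import Mathlib
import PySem

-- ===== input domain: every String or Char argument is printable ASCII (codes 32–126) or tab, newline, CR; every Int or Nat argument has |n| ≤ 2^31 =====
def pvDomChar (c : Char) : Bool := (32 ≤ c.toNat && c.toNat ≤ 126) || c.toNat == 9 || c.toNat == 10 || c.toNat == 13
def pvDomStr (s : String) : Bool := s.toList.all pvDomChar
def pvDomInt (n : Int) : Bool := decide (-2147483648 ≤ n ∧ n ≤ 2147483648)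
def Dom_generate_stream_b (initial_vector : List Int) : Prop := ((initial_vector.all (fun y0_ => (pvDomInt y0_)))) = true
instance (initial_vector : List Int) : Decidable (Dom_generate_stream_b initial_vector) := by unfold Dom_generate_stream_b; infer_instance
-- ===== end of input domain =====

-- B drops A's separate sliding-window list (append + pop(0)) and indexes the growing
-- output directly (objective: simpler). Return-value equivalence on vectors of length ≥ 4.

-- ===== PORT A =====
-- one loop iteration of A: state = (z, stream); pyGet? none (= IndexError) is excluded by Pre_
def pvStepA (st : List Int × List Int) (_ : Nat) : List Int × List Int :=
  let z := st.1
  let new_bit := PySem.Int.mod ((PySem.List.pyGet? z 0).getD 0 + (PySem.List.pyGet? z 3).getD 0) 2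
  ((z ++ [new_bit]).drop 1, st.2 ++ [new_bit])   -- z.append(new_bit); z.pop(0); stream.append(new_bit)

def generate_stream_b (initial_vector : List Int) : List Int :=
  ((List.range 100).foldl pvStepA (initial_vector, initial_vector)).2

-- ===== PORT B =====
-- one loop iteration of B: append (stream[t] + stream[t+3]) % 2
def pvStepB (stream : List Int) (t : Nat) : List Int :=
  stream ++ [PySem.Int.mod ((PySem.List.pyGet? stream (t : Int)).getD 0
                            + (PySem.List.pyGet? stream ((t : Int) + 3)).getD 0) 2]

def generate_stream_b_alt (initial_vector : List Int) : List Int :=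
  (List.range 100).foldl pvStepB initial_vector

-- ===== PRECONDITION & SPEC =====
-- Python A raises IndexError (z[3], or z[0] on empty) when len(initial_vector) < 4
def Pre_generate_stream_b (initial_vector : List Int) : Prop := 4 ≤ initial_vector.length
instance (initial_vector : List Int) : Decidable (Pre_generate_stream_b initial_vector) := by
  unfold Pre_generate_stream_b; infer_instance

def pvWitness_generate_stream_b : List Int := [1, 0, 1, 1]

def Spec_generate_stream_b (initial_vector : List Int) (out : List Int) : Prop :=
  out = generate_stream_b_alt initial_vector
instance (initial_vector : List Int) (out : List Int) : Decidable (Spec_generate_stream_b initial_vector out) := by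
  unfold Spec_generate_stream_b; infer_instance

-- ===== CLAIM =====
def Claim_equal_generate_stream_b : Prop := ∀ (initial_vector : List Int),
  Dom_generate_stream_b initial_vector → Pre_generate_stream_b initial_vector →
  Spec_generate_stream_b initial_vector (generate_stream_b initial_vector)

-- ===== LEMMAS AND PROOFS =====

lemma pvAltLen (iv : List Int) (k : Nat) :
    ((List.range k).foldl pvStepB iv).length = iv.length + k := by
  induction k with
  | zero => simp
  | succ k ih => simp [List.range_succ, pvStepB, ih]; omega

-- invariant: after k iterations A's state is (B's stream with its first k entries dropped, B's stream)
lemma pvInv (iv : List Int) (h : 4 ≤ iv.length) (k : Nat) :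
    (List.range k).foldl pvStepA (iv, iv)
      = (((List.range k).foldl pvStepB iv).drop k, (List.range k).foldl pvStepB iv) := by
  induction k with
  | zero => simp
  | succ k ih =>
    have hlen : ((List.range k).foldl pvStepB iv).length = iv.length + k := pvAltLen iv k
    set s := (List.range k).foldl pvStepB iv with hs
    have h0 : k < s.length := by omega
    have h3 : k + 3 < s.length := by omega
    have hz0 : PySem.List.pyGet? (s.drop k) 0 = some s[k] := by
      rw [show ((0 : Int)) = ((0 : Nat) : Int) by norm_num, PySem.List.pyGet?_natCast]
      simp [h0]
    have hz3 : PySem.List.pyGet? (s.drop k) 3 = some s[k + 3] := by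
      rw [show ((3 : Int)) = ((3 : Nat) : Int) by norm_num, PySem.List.pyGet?_natCast]
      simp [h3]
    have hb0 : PySem.List.pyGet? s ((k : Nat) : Int) = some s[k] := by
      rw [PySem.List.pyGet?_natCast]; simp [h0]
    have hb3 : PySem.List.pyGet? s (((k : Nat) : Int) + 3) = some s[k + 3] := by
      rw [show (((k : Nat) : Int) + 3) = (((k + 3 : Nat)) : Int) by push_cast; ring,
          PySem.List.pyGet?_natCast]
      simp [h3]
    rw [List.range_succ, List.foldl_append, List.foldl_append, ih, ← hs]
    simp only [List.foldl_cons, List.foldl_nil, pvStepA, pvStepB, hz0, hz3, hb0, hb3,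
      Option.getD_some, Prod.mk.injEq]
    refine ⟨?_, trivial⟩
    -- (s.drop k ++ [nb]).drop 1 = (s ++ [nb]).drop (k+1)
    rw [List.drop_append_of_le_length (by simp; omega), List.drop_append_of_le_length (by simp; omega),
        List.drop_drop]

-- ===== VERDICT =====
theorem generate_stream_b_spec : Claim_equal_generate_stream_b := by
  intro iv _ hpre
  unfold Spec_generate_stream_b generate_stream_b generate_stream_b_alt
  rw [pvInv iv hpre 100]
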